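-- pv_equiv track=rewrite | github.com/diegoPenguino/diegoPenguino.github.io | assets/problems/2023/EGOI/joven/sol.py | solve
-- ===== SOURCE A (Python) =====
-- def solve(Q: int, R: int) -> int:
--     assert Q < R
--     assert 0 <= Q <= 10**6
--     assert Q < R <= 10**6
--     R -= 15
--     Q -= 15
--     for possible_k in range(R, 0, -1):
--         saved_years = R // possible_k
--         if R - saved_years <= Q:
--             return possible_k
--     return 0
-- ===== SOURCE B (Python) =====
-- def solve(Q: int, R: int) -> int:
--     assert Q < R
--     assert 0 <= Q <= 10**6
--     assert Q < R <= 10**6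
--     r = R - 15
--     if r <= 0:
--         return 0
--     return r // (R - Q)
-- ===== Notes on version B (the rewrite author's own statement) =====
-- stated objective: faster
-- what changed: Replaces the descending linear scan for the largest k with R//k >= R-Q by the closed form (R-15)//(R-Q) (0 when R-15 <= 0), using the standard floor-division reflection k <= r//d iff k*d <= r.
import Mathlib
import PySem

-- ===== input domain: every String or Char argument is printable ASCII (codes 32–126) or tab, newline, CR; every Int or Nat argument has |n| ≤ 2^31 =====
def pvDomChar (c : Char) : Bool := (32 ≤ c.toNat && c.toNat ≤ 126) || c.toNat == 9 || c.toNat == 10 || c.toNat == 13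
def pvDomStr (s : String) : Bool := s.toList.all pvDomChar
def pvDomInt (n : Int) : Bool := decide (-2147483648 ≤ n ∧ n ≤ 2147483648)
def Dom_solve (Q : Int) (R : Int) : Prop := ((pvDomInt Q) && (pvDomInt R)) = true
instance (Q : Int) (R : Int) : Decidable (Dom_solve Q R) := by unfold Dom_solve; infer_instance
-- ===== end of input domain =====

-- B replaces A's O(R) descending scan by the closed form (R-15)//(R-Q), guarded for R-15 ≤ 0.

-- ===== PORT A =====
-- the for-loop 'for possible_k in range(R, 0, -1)' ported as structural recursion on the
-- counter: solveLoopA r q n scans n, n-1, …, 1 exactly as the Python loop does.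
def solveLoopA (r q : Int) : Nat → Int
  | 0 => 0
  | Nat.succ k =>
      if r - PySem.Int.floordiv r ((k : Int) + 1) ≤ q then (k : Int) + 1
      else solveLoopA r q k

def solve (Q : Int) (R : Int) : Int :=
  solveLoopA (R - 15) (Q - 15) (R - 15).toNat

-- ===== PORT B =====
def solve_alt (Q : Int) (R : Int) : Int :=
  let r := R - 15
  if r ≤ 0 then 0 else PySem.Int.floordiv r (R - Q)

-- ===== PRECONDITION & SPEC =====
-- Pre_ = exactly the inputs passing A's asserts (otherwise A raises AssertionError)
def Pre_solve (Q : Int) (R : Int) : Prop := 0 ≤ Q ∧ Q < R ∧ R ≤ 10^6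
instance (Q : Int) (R : Int) : Decidable (Pre_solve Q R) := by unfold Pre_solve; infer_instance
def pvWitness_solve : Int × Int := (20, 100)

def Spec_solve (Q : Int) (R : Int) (out : Int) : Prop := out = solve_alt Q R
instance (Q : Int) (R : Int) (out : Int) : Decidable (Spec_solve Q R out) := by unfold Spec_solve; infer_instance

-- ===== CLAIM (what is proved, stated in full; the proofs are below) =====
def Claim_equal_solve : Prop := ∀ (Q : Int) (R : Int), Dom_solve Q R → Pre_solve Q R → Spec_solve Q R (solve Q R)

-- ===== LEMMAS AND PROOFS =====

-- loop condition reflection: for k ≥ 1, d ≥ 1:  r - r//k ≤ q  ↔  k ≤ r//d  (d = r - q)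
theorem loop_cond_iff (r q k : Int) (hk : 0 < k) (hd : 0 < r - q) :
    (r - PySem.Int.floordiv r k ≤ q) ↔ k ≤ PySem.Int.floordiv r (r - q) := by
  rw [PySem.Int.le_floordiv_iff_mul_le hd]
  constructor
  · intro h
    have h1 : r - q ≤ PySem.Int.floordiv r k := by omega
    have := (PySem.Int.le_floordiv_iff_mul_le hk).mp h1
    nlinarith
  · intro h
    have h1 : r - q ≤ PySem.Int.floordiv r k := by
      rw [PySem.Int.le_floordiv_iff_mul_le hk]
      nlinarith
    omega

theorem solveLoopA_eq (r q m : Int) (hd : 0 < r - q)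
    (hm : m = PySem.Int.floordiv r (r - q)) (hm0 : 0 ≤ m) :
    ∀ n : Nat, solveLoopA r q n = min (n : Int) m := by
  intro n
  induction n with
  | zero => simp [solveLoopA]; omega
  | succ k ih =>
      rw [solveLoopA]
      by_cases h : r - PySem.Int.floordiv r ((k : Int) + 1) ≤ q
      · have h' := (loop_cond_iff r q ((k : Int) + 1) (by positivity) hd).mp h
        rw [if_pos h, ← hm] at *
        push_cast
        omega
      · have h' := fun hc => h ((loop_cond_iff r q ((k : Int) + 1) (by positivity) hd).mpr hc)
        rw [if_neg h, ih, ← hm] at *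
        have h'' : ¬ ((k : Int) + 1 ≤ m) := fun hc => h' (by rw [hm] at hc; exact hc)
        push_cast
        omega

-- ===== VERDICT (by name: the statement is the Claim_ definition above) =====
theorem solve_spec : Claim_equal_solve := by
  intro Q R _ hpre
  obtain ⟨hQ, hQR, hR⟩ := hpre
  unfold Spec_solve solve solve_alt
  set r := R - 15 with hr
  set q := Q - 15 with hq
  have hd : 0 < r - q := by omega
  by_cases hrpos : r ≤ 0
  · have : r.toNat = 0 := by omega
    simp [this, solveLoopA, hrpos]
  · push Not at hrpos
    have hrq : r - q = R - Q := by omega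
    set m := PySem.Int.floordiv r (r - q) with hm
    have hm0 : 0 ≤ m := by
      rw [hm, PySem.Int.le_floordiv_iff_mul_le hd]; omega
    have hmr : m ≤ r := by
      have h2 : m * (r - q) ≤ r := by
        rw [hm]
        exact (PySem.Int.le_floordiv_iff_mul_le hd).mp (le_refl _)
      nlinarith
    rw [solveLoopA_eq r q m hd hm hm0 r.toNat]
    have : ((r.toNat : Int)) = r := by omega
    rw [this, if_neg (by omega), ← hrq, ← hm]
    omega
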